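-- pv_equiv track=rewrite | github.com/lief37/power4 | board.py | checkVictoryOnLine
-- ===== SOURCE A (Python) =====
-- def checkVictoryOnLine(list):
--     consec = 0
--     player = 0
--     for elem in list:
--         if (elem != player):
--             player = elem
--             consec = 1
--         else:
--             consec+=1
--         if (consec >= 4):
--             return player
--     return 0
-- ===== SOURCE B (Python) =====
-- def checkVictoryOnLine(list):
--     # Pass 1: run-length encode the line into maximal runs [value, count].
--     runs = []
--     for elem in list:
--         if runs and runs[-1][0] == elem:
--             runs[-1][1] += 1
--         else:
--             runs.append([elem, 1])
--     # Pass 2: the first run of length >= 4 wins (its value may be 0, like A).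
--     for value, count in runs:
--         if count >= 4:
--             return value
--     return 0
-- ===== Notes on version B (the rewrite author's own statement) =====
-- stated objective: alternative
-- what changed: A's single pass with a running counter and early return is replaced by run-length encoding the line into maximal runs and then returning the value of the first run of length >= 4.
import Mathlib
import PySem

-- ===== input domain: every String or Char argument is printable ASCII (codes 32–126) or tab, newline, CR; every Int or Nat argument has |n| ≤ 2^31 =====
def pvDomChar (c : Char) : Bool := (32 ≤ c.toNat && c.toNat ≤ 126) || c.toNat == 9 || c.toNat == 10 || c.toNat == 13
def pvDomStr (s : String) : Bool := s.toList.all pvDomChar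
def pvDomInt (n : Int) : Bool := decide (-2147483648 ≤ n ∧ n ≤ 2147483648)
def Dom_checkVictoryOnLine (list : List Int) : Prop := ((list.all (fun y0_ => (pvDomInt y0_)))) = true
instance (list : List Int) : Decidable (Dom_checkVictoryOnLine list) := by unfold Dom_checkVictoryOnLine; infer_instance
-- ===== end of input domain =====

-- B re-implements A by run-length encoding the line and scanning the runs; same values, no speed claim.
-- ===== PORT A =====
-- the 'for elem in list' loop with early return, as structural recursion on (consec, player)
def pvGoA (consec player : Int) : List Int → Int
  | [] => 0
  | e :: t =>
    let st := if e ≠ player then (1, e) else (consec + 1, player)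
    if st.1 ≥ 4 then st.2 else pvGoA st.1 st.2 t

def checkVictoryOnLine (list : List Int) : Int := pvGoA 0 0 list

-- ===== PORT B =====
-- pass 1 loop body: runs[-1][1] += 1 via dropLast ++, runs.append via ++ [...]
def pvStep (acc : List (Int × Int)) (e : Int) : List (Int × Int) :=
  match acc.getLast? with
  | some (k, c) => if k = e then acc.dropLast ++ [(k, c + 1)] else acc ++ [(e, 1)]
  | none => acc ++ [(e, 1)]

-- pass 2: first run with count >= 4 wins
def pvFirstWin : List (Int × Int) → Int
  | [] => 0
  | (k, c) :: rest => if c ≥ 4 then k else pvFirstWin rest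

def checkVictoryOnLine_alt (list : List Int) : Int :=
  pvFirstWin (list.foldl pvStep [])

-- ===== PRECONDITION & SPEC =====
def Spec_checkVictoryOnLine (list : List Int) (out : Int) : Prop := out = checkVictoryOnLine_alt list
instance (list : List Int) (out : Int) : Decidable (Spec_checkVictoryOnLine list out) := by unfold Spec_checkVictoryOnLine; infer_instance

-- ===== CLAIM (what is proved, stated in full; the proofs are below) =====
def Claim_equal_checkVictoryOnLine : Prop := ∀ (list : List Int), Dom_checkVictoryOnLine list → Spec_checkVictoryOnLine list (checkVictoryOnLine list)

-- ===== LEMMAS AND PROOFS =====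

-- ===== VERDICT (by name: the statement is the Claim_ definition above) =====
-- proof-side helper: the run-length encoding of t continuing a current run (k, c)
def pvRunsAux (k c : Int) : List Int → List (Int × Int)
  | [] => [(k, c)]
  | e :: t => if e = k then pvRunsAux k (c + 1) t else (k, c) :: pvRunsAux e 1 t

lemma fw_runsAux_ge4 (t : List Int) : ∀ k c : Int, 4 ≤ c → pvFirstWin (pvRunsAux k c t) = k := by
  induction t with
  | nil => intro k c h; simp [pvRunsAux, pvFirstWin, h]
  | cons e t ih =>
    intro k c h
    by_cases he : e = k
    · simp [pvRunsAux, he]; exact ih k (c + 1) (by omega)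
    · simp [pvRunsAux, he, pvFirstWin, h]

lemma goA_eq_fw (t : List Int) : ∀ k c : Int, 1 ≤ c → c ≤ 3 →
    pvGoA c k t = pvFirstWin (pvRunsAux k c t) := by
  induction t with
  | nil => intro k c h1 h3; simp [pvGoA, pvRunsAux, pvFirstWin]; omega
  | cons e t ih =>
    intro k c h1 h3
    by_cases he : e = k
    · subst he
      by_cases h4 : c + 1 ≥ 4
      · simp [pvGoA, pvRunsAux, h4, fw_runsAux_ge4 t e (c + 1) h4]
      · simp [pvGoA, pvRunsAux, h4]
        exact ih e (c + 1) (by omega) (by omega)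
    · have h14 : ¬ ((1 : Int) ≥ 4) := by omega
      have hc4 : ¬ (c ≥ 4) := by omega
      simp [pvGoA, pvRunsAux, he, h14, pvFirstWin, hc4]
      exact ih e 1 (by omega) (by omega)

lemma foldl_step_eq (t : List Int) : ∀ (acc : List (Int × Int)) (k c : Int),
    List.foldl pvStep (acc ++ [(k, c)]) t = acc ++ pvRunsAux k c t := by
  induction t with
  | nil => intro acc k c; simp [pvRunsAux]
  | cons e t ih =>
    intro acc k c
    by_cases he : e = k
    · have hs : pvStep (acc ++ [(k, c)]) e = acc ++ [(k, c + 1)] := by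
        simp [pvStep, he]
      rw [List.foldl_cons, hs, ih acc k (c + 1)]
      simp [pvRunsAux, he]
    · have hne : k ≠ e := fun h => he h.symm
      have hs : pvStep (acc ++ [(k, c)]) e = (acc ++ [(k, c)]) ++ [(e, 1)] := by
        simp [pvStep, hne]
      rw [List.foldl_cons, hs, ih (acc ++ [(k, c)]) e 1]
      simp [pvRunsAux, he]

theorem checkVictoryOnLine_spec : Claim_equal_checkVictoryOnLine := by
  intro list _
  unfold Spec_checkVictoryOnLine checkVictoryOnLine checkVictoryOnLine_alt
  cases list with
  | nil => simp [pvGoA, pvFirstWin]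
  | cons e t =>
    have hA : pvGoA 0 0 (e :: t) = pvGoA 1 e t := by
      by_cases he : e = 0 <;> simp [pvGoA, he]
    have hstep : pvStep [] e = [] ++ [(e, 1)] := by simp [pvStep]
    rw [hA, goA_eq_fw t e 1 (by omega) (by omega), List.foldl_cons, hstep,
      foldl_step_eq t [] e 1, List.nil_append]
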